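-- pv_equiv track=rewrite | github.com/tehyoyee/baekjoon | asdf.py | solution
-- ===== SOURCE A (Python) =====
-- from collections import defaultdict
--
-- def solution(kor, usa, incs):
--     answer = 0
--
--     country = {}
--     for i in kor:
--         country[i] = 0
--     for i in usa:
--         country[i] = 1
--     combs = defaultdict(int)
--     for stocks in incs:
--         stocks = stocks.split()
--
--         for i in range(len(stocks)):
--             for j in range(i+1, len(stocks)):
--                 if country[stocks[i]] != country[stocks[j]]:
--                     if country[stocks[i]] == 0:
--                         combs[(stocks[i], stocks[j])] += 1
--                     else:
--                         combs[(stocks[j], stocks[i])] += 1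
--
--     if len(combs) == 0:
--         return 0
--     combs = sorted(combs.values(), reverse=True)
--
--     return(combs[0])
-- ===== SOURCE B (Python) =====
-- def solution(kor, usa, incs):
--     country = {}
--     for t in kor:
--         country[t] = 0
--     for t in usa:
--         country[t] = 1
--     combs = {}
--     best = 0
--     for line in incs:
--         toks = line.split()
--         if len(toks) < 2:
--             continue
--         ks = [t for t in toks if country[t] == 0]
--         us = [t for t in toks if country[t] == 1]
--         for k in ks:
--             for u in us:
--                 c = combs.get((k, u), 0) + 1
--                 combs[(k, u)] = c
--                 if c > best:
--                     best = c
--     return best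
-- ===== Notes on version B (the rewrite author's own statement) =====
-- stated objective: alternative
-- what changed: Replaces the all-pairs i<j index scan with a same/different-country filter by a partition of each line's tokens into a Korean group and a US group followed by a cross-product count, and replaces the final sort-descending-take-head by a running maximum carried through the loop.
import Mathlib
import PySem

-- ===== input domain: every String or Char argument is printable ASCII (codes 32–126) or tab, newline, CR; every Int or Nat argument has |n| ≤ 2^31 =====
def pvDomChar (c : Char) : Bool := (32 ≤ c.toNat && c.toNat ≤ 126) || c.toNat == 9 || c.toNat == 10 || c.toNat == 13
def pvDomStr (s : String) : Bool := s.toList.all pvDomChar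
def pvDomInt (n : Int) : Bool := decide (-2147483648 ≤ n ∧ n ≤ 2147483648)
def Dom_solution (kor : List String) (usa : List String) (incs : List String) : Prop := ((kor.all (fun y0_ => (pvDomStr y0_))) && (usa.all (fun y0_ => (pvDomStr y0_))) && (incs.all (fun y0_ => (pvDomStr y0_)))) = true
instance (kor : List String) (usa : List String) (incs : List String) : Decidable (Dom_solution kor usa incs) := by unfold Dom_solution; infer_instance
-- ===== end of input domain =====

-- B replaces A's all-pairs i<j scan with a partition of each line into a Korean and a US token
-- group followed by a cross-product count with a running maximum (no sort, no final pass);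
-- objective: alternative decomposition, same results.

-- ===== PORT A =====
def solution (kor : List String) (usa : List String) (incs : List String) : Int :=
  let country : PySem.Dict String Int :=
    usa.foldl (fun d t => d.insert t 1) (kor.foldl (fun d t => d.insert t 0) PySem.Dict.empty)
  let combs : PySem.Dict (String × String) Int :=
    incs.foldl (fun combs line =>
      let stocks := PySem.Str.split₀ line
      (PySem.List.pyRange 0 (stocks.length : Int) 1).foldl (fun combs i =>
        (PySem.List.pyRange (i+1) (stocks.length : Int) 1).foldl (fun combs j =>
          let si := PySem.List.pyGetD stocks i ""
          let sj := PySem.List.pyGetD stocks j ""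
          -- country[x] would raise KeyError on a token outside the dict; Pre_ excludes that, getD is exact inside Pre_
          if country.getD si 0 ≠ country.getD sj 0 then
            if country.getD si 0 == 0 then combs.modify (si, sj) 0 (· + 1)
            else combs.modify (sj, si) 0 (· + 1)
          else combs) combs) combs)
      PySem.Dict.empty
  if combs.size == 0 then 0
  else PySem.List.pyGetD (PySem.List.sorted combs.values (fun v => v) true) 0 0

-- ===== PORT B =====
def solution_alt (kor : List String) (usa : List String) (incs : List String) : Int :=
  let country : PySem.Dict String Int :=
    usa.foldl (fun d t => d.insert t 1) (kor.foldl (fun d t => d.insert t 0) PySem.Dict.empty)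
  let st : PySem.Dict (String × String) Int × Int :=
    incs.foldl (fun st line =>
      let toks := PySem.Str.split₀ line
      if toks.length < 2 then st else
      -- country[t] would raise KeyError on a token outside the dict; Pre_ excludes that, getD is exact inside Pre_
      let ks := toks.filter (fun t => country.getD t 0 == 0)
      let us := toks.filter (fun t => country.getD t 0 == 1)
      ks.foldl (fun st k =>
        us.foldl (fun st u =>
          let c := st.1.getD (k, u) 0 + 1
          (st.1.insert (k, u) c, if c > st.2 then c else st.2)) st) st)
      (PySem.Dict.empty, 0)
  st.2

-- ===== PRECONDITION & SPEC =====
-- Pre_ excludes inputs where some line with at least two tokens contains a token in neither kor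
-- nor usa: exactly there Python A (and Python B) raise KeyError and return nothing.
def Pre_solution (kor : List String) (usa : List String) (incs : List String) : Prop :=
  ∀ line ∈ incs, 2 ≤ (PySem.Str.split₀ line).length →
    ∀ t ∈ PySem.Str.split₀ line, t ∈ kor ∨ t ∈ usa
instance (kor : List String) (usa : List String) (incs : List String) : Decidable (Pre_solution kor usa incs) := by unfold Pre_solution; infer_instance

def pvWitness_solution : List String × List String × List String := (["AAA"], ["BBB"], ["AAA BBB", "BBB AAA AAA"])

def Spec_solution (kor : List String) (usa : List String) (incs : List String) (out : Int) : Prop := out = solution_alt kor usa incs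
instance (kor : List String) (usa : List String) (incs : List String) (out : Int) : Decidable (Spec_solution kor usa incs out) := by unfold Spec_solution; infer_instance

-- ===== CLAIM (what is proved, stated in full; the proofs are below) =====
def Claim_equal_solution : Prop := ∀ (kor : List String) (usa : List String) (incs : List String), Dom_solution kor usa incs → Pre_solution kor usa incs → Spec_solution kor usa incs (solution kor usa incs)


-- ===== LEMMAS AND PROOFS =====

-- the country classifier both ports build (kor ↦ 0 overwritten by usa ↦ 1; default 0 outside Pre_)
def cty (kor usa : List String) : String → Int :=
  fun t => (usa.foldl (fun d t => d.insert t 1) (kor.foldl (fun d t => d.insert t 0) PySem.Dict.empty)).getD t 0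

-- the optional counted key A produces for a position pair (i before j)
def gpair (c : String → Int) (t s : String) : Option (String × String) :=
  if c t ≠ c s then (if c t == 0 then some (t, s) else some (s, t)) else none

-- structural form of A's i<j scan of one line
def pairsS (c : String → Int) : List String → List (String × String)
  | [] => []
  | t :: rest => rest.filterMap (gpair c t) ++ pairsS c rest

-- B's cross product of one line
def eventsB (c : String → Int) (toks : List String) : List (String × String) :=
  (toks.filter (fun t => c t == 0)).flatMap (fun k => (toks.filter (fun t => c t == 1)).map (fun u => (k, u)))

def evA (c : String → Int) (incs : List String) : List (String × String) :=
  incs.flatMap (fun line => pairsS c (PySem.Str.split₀ line))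

def evB (c : String → Int) (incs : List String) : List (String × String) :=
  incs.flatMap (fun line => eventsB c (PySem.Str.split₀ line))

def stepB (st : PySem.Dict (String × String) Int × Int) (q : String × String) :
    PySem.Dict (String × String) Int × Int :=
  let c := st.1.getD q 0 + 1
  (st.1.insert q c, if c > st.2 then c else st.2)

-- maybe-increment step on the counting dict
def modStep {K : Type} [BEq K] (cb : PySem.Dict K Int) (o : Option K) : PySem.Dict K Int :=
  match o with
  | some k => cb.modify k 0 (· + 1)
  | none => cb

-- a conditional-increment loop is the increment loop over the filterMap'd keys
theorem foldl_filterMap_modify {α K : Type} [BEq K] (l : List α) (F : α → Option K)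
    (d : PySem.Dict K Int) :
    l.foldl (fun cb x => modStep cb (F x)) d
      = (l.filterMap F).foldl (fun cb k => cb.modify k 0 (· + 1)) d := by
  induction l generalizing d with
  | nil => rfl
  | cons x xs ih =>
      simp only [List.foldl_cons, List.filterMap_cons]
      cases h : F x
      · simp only [h, modStep]
        exact ih d
      · simp only [h, modStep, List.foldl_cons]
        exact ih _

-- A's body for fixed i, as a step on gpair
theorem bodyA_eq (c : String → Int) (ti tj : String)
    (cb : PySem.Dict (String × String) Int) :
    (if c ti ≠ c tj then
        if c ti == 0 then cb.modify (ti, tj) 0 (· + 1) else cb.modify (tj, ti) 0 (· + 1)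
      else cb)
      = modStep cb (gpair c ti tj) := by
  unfold gpair modStep
  split_ifs <;> simp

-- A's double index loop over one line, structurally
theorem outerAll (c : String → Int) (toks : List String) (a : ℕ) (ha : a ≤ toks.length)
    (d : PySem.Dict (String × String) Int) :
    (PySem.List.pyRange (a : Int) (toks.length : Int)).foldl (fun cb i =>
        (PySem.List.pyRange (i + 1) (toks.length : Int)).foldl (fun cb j =>
          if c (PySem.List.pyGetD toks i "") ≠ c (PySem.List.pyGetD toks j "") then
            if c (PySem.List.pyGetD toks i "") == 0 then
              cb.modify (PySem.List.pyGetD toks i "", PySem.List.pyGetD toks j "") 0 (· + 1)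
            else
              cb.modify (PySem.List.pyGetD toks j "", PySem.List.pyGetD toks i "") 0 (· + 1)
          else cb) cb) d
      = (pairsS c (toks.drop a)).foldl (fun cb k => cb.modify k 0 (· + 1)) d := by
  rcases eq_or_lt_of_le ha with heq | hlt
  · rw [PySem.List.pyRange_one_eq_nil (by exact_mod_cast le_of_eq heq.symm)]
    rw [List.drop_of_length_le (le_of_eq heq.symm)]
    rfl
  · rw [PySem.List.pyRange_one_cons (by exact_mod_cast hlt)]
    rw [List.foldl_cons]
    have hget : PySem.List.pyGetD toks (a : Int) "" = toks[a] := by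
      rw [PySem.List.pyGetD_of_nonneg toks "" (by positivity)]
      simp [List.getD_eq_getElem?_getD, hlt]
    have hdrop : toks.drop a = toks[a] :: toks.drop (a + 1) :=
      List.drop_eq_getElem_cons hlt
    -- inner loop: conditional modify over range → modify over filterMap over drop
    have hinner : ∀ cb : PySem.Dict (String × String) Int,
        (PySem.List.pyRange ((a : Int) + 1) (toks.length : Int)).foldl (fun cb j =>
          if c (PySem.List.pyGetD toks (a : Int) "") ≠ c (PySem.List.pyGetD toks j "") then
            if c (PySem.List.pyGetD toks (a : Int) "") == 0 then
              cb.modify (PySem.List.pyGetD toks (a : Int) "", PySem.List.pyGetD toks j "") 0 (· + 1)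
            else
              cb.modify (PySem.List.pyGetD toks j "", PySem.List.pyGetD toks (a : Int) "") 0 (· + 1)
          else cb) cb
        = ((toks.drop (a + 1)).filterMap (gpair c toks[a])).foldl
            (fun cb k => cb.modify k 0 (· + 1)) cb := by
      intro cb
      rw [PySem.List.foldl_congr_mem _ _ (fun cb j =>
            modStep cb (gpair c (PySem.List.pyGetD toks (a : Int) "") (PySem.List.pyGetD toks j ""))) cb
          (fun cb' j _ => bodyA_eq c _ _ cb')]
      rw [foldl_filterMap_modify _ (fun j => gpair c (PySem.List.pyGetD toks (a : Int) "") (PySem.List.pyGetD toks j "")) cb]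
      congr 1
      have : (PySem.List.pyRange ((a : Int) + 1) (toks.length : Int)).filterMap
          (fun j => gpair c (PySem.List.pyGetD toks (a : Int) "") (PySem.List.pyGetD toks j "")) =
          ((PySem.List.pyRange ((a : Int) + 1) (toks.length : Int)).map
            (fun j => PySem.List.pyGetD toks j "")).filterMap
              (gpair c (PySem.List.pyGetD toks (a : Int) "")) := by
        rw [List.filterMap_map]; rfl
      rw [this, PySem.List.map_pyGetD_pyRange' toks "" (by positivity)]
      rw [hget]
      have hcast : ((a : Int) + 1).toNat = a + 1 := by omega
      rw [hcast]
    rw [hinner d]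
    rw [show ((a : Int) + 1) = ((a + 1 : ℕ) : Int) by push_cast; ring]
    rw [outerAll c toks (a + 1) hlt]
    rw [hdrop]
    simp [pairsS, List.foldl_append]
termination_by toks.length - a

-- A's double loop starting at index 0
theorem outerAll0 (c : String → Int) (toks : List String) (d : PySem.Dict (String × String) Int) :
    (PySem.List.pyRange 0 (toks.length : Int)).foldl (fun cb i =>
        (PySem.List.pyRange (i + 1) (toks.length : Int)).foldl (fun cb j =>
          if c (PySem.List.pyGetD toks i "") ≠ c (PySem.List.pyGetD toks j "") then
            if c (PySem.List.pyGetD toks i "") == 0 then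
              cb.modify (PySem.List.pyGetD toks i "", PySem.List.pyGetD toks j "") 0 (· + 1)
            else
              cb.modify (PySem.List.pyGetD toks j "", PySem.List.pyGetD toks i "") 0 (· + 1)
          else cb) cb) d
      = (pairsS c toks).foldl (fun cb k => cb.modify k 0 (· + 1)) d := by
  have h := outerAll c toks 0 (Nat.zero_le _) d
  simpa using h

-- A's port, in terms of the event list evA
theorem solution_eq (kor usa incs : List String) :
    solution kor usa incs =
      (if (PySem.Dict.counter (evA (cty kor usa) incs)).size == 0 then 0
       else PySem.List.pyGetD
         (PySem.List.sorted (PySem.Dict.counter (evA (cty kor usa) incs)).values (fun v => v) true) 0 0) := by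
  have hc : (incs.foldl (fun (combs : PySem.Dict (String × String) Int) line =>
      (PySem.List.pyRange 0 ((PySem.Str.split₀ line).length : Int) 1).foldl (fun combs i =>
        (PySem.List.pyRange (i+1) ((PySem.Str.split₀ line).length : Int) 1).foldl (fun combs j =>
          if (cty kor usa) (PySem.List.pyGetD (PySem.Str.split₀ line) i "") ≠ (cty kor usa) (PySem.List.pyGetD (PySem.Str.split₀ line) j "") then
            if (cty kor usa) (PySem.List.pyGetD (PySem.Str.split₀ line) i "") == 0 then
              combs.modify (PySem.List.pyGetD (PySem.Str.split₀ line) i "", PySem.List.pyGetD (PySem.Str.split₀ line) j "") 0 (· + 1)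
            else combs.modify (PySem.List.pyGetD (PySem.Str.split₀ line) j "", PySem.List.pyGetD (PySem.Str.split₀ line) i "") 0 (· + 1)
          else combs) combs) combs)
      PySem.Dict.empty)
      = PySem.Dict.counter (evA (cty kor usa) incs) := by
    rw [PySem.Dict.counter_eq_foldl]
    unfold evA
    rw [List.foldl_flatMap]
    refine PySem.List.foldl_congr_mem incs _ _ _ ?_
    intro d line _
    exact outerAll0 (cty kor usa) (PySem.Str.split₀ line) d
  exact congrArg (fun combs : PySem.Dict (String × String) Int =>
    if combs.size == 0 then (0 : Int)
    else PySem.List.pyGetD (PySem.List.sorted combs.values (fun v => v) true) 0 0) hc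

-- B's port, as one fold of stepB over the event list evB
-- a line with fewer than two tokens contributes no cross pairs
theorem eventsB_short (c : String → Int) (toks : List String) (h : toks.length < 2) :
    eventsB c toks = [] := by
  match toks, h with
  | [], _ => rfl
  | [t], _ =>
      unfold eventsB
      by_cases h0 : c t == 0
      · have h1 : ¬(c t == 1) := by
          simp only [beq_iff_eq] at h0 ⊢; omega
        simp [List.filter_cons, h0, h1]
      · simp [List.filter_cons, h0]

theorem solution_alt_eq (kor usa incs : List String) :
    solution_alt kor usa incs = ((evB (cty kor usa) incs).foldl stepB (PySem.Dict.empty, 0)).2 := by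
  have h : (incs.foldl (fun (st : PySem.Dict (String × String) Int × Int) line =>
      if (PySem.Str.split₀ line).length < 2 then st else
      ((PySem.Str.split₀ line).filter (fun t => (cty kor usa) t == 0)).foldl (fun st k =>
        ((PySem.Str.split₀ line).filter (fun t => (cty kor usa) t == 1)).foldl (fun st u =>
          (st.1.insert (k, u) (st.1.getD (k, u) 0 + 1),
            if st.1.getD (k, u) 0 + 1 > st.2 then st.1.getD (k, u) 0 + 1 else st.2)) st) st)
      (PySem.Dict.empty, 0))
      = (evB (cty kor usa) incs).foldl stepB (PySem.Dict.empty, 0) := by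
    unfold evB
    rw [List.foldl_flatMap]
    refine PySem.List.foldl_congr_mem incs _ _ _ ?_
    intro st line _
    by_cases hlen : (PySem.Str.split₀ line).length < 2
    · rw [if_pos hlen, eventsB_short _ _ hlen]
      rfl
    · rw [if_neg hlen]
      unfold eventsB
      rw [List.foldl_flatMap]
      refine PySem.List.foldl_congr_mem _ _ _ _ ?_
      intro st' k _
      rw [List.foldl_map]
      rfl
  exact congrArg Prod.snd h

-- the running-max invariant of B's fold
theorem b_invariant (E C : List (String × String)) (d : PySem.Dict (String × String) Int) (b : Int)
    (hd : ∀ p, d.getD p 0 = C.count p)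
    (hub : ∀ p ∈ C, (C.count p : Int) ≤ b)
    (hex : b = 0 ∨ ∃ p ∈ C, b = (C.count p : Int)) :
    (∀ p ∈ C ++ E, ((C ++ E).count p : Int) ≤ (E.foldl stepB (d, b)).2) ∧
      ((E.foldl stepB (d, b)).2 = 0 ∨
        ∃ p ∈ C ++ E, (E.foldl stepB (d, b)).2 = ((C ++ E).count p : Int)) := by
  induction E generalizing C d b with
  | nil =>
      simp only [List.append_nil, List.foldl_nil]
      exact ⟨hub, hex⟩
  | cons q E ih =>
      have hdq := hd q
      have hq : d.getD q 0 + 1 = ((C ++ [q]).count q : Int) := by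
        rw [hd q]; simp [List.count_append]
      have step1 : ∀ p, (d.insert q (d.getD q 0 + 1)).getD p 0 = ((C ++ [q]).count p : Int) := by
        intro p
        by_cases hpq : p = q
        · subst hpq; rw [PySem.Dict.getD_insert_self]; exact hq
        · have hqp : ¬q = p := fun h => hpq h.symm
          rw [PySem.Dict.getD_insert_of_ne _ _ _ hpq, hd p]
          simp [List.count_append, List.count_singleton, hqp]
      have hb' : ∀ p ∈ C ++ [q], ((C ++ [q]).count p : Int) ≤
          (if d.getD q 0 + 1 > b then d.getD q 0 + 1 else b) := by
        intro p hp
        by_cases hpq : p = q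
        · rw [hpq, ← hq]
          by_cases hgt : d.getD q 0 + 1 > b
          · rw [if_pos hgt]
          · rw [if_neg hgt]; omega
        · have hqp : ¬q = p := fun h => hpq h.symm
          have hcnt : (C ++ [q]).count p = C.count p := by
            simp [List.count_append, List.count_singleton, hqp]
          rw [hcnt]
          have hpc : p ∈ C := by
            rcases List.mem_append.1 hp with h | h
            · exact h
            · simp at h; exact absurd h hpq
          have h1 := hub p hpc
          by_cases hgt : d.getD q 0 + 1 > b
          · rw [if_pos hgt]; omega
          · rw [if_neg hgt]; exact h1
      have hex' : (if d.getD q 0 + 1 > b then d.getD q 0 + 1 else b) = 0 ∨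
          ∃ p ∈ C ++ [q], (if d.getD q 0 + 1 > b then d.getD q 0 + 1 else b) = ((C ++ [q]).count p : Int) := by
        by_cases hgt : d.getD q 0 + 1 > b
        · rw [if_pos hgt]
          exact Or.inr ⟨q, by simp, hq⟩
        · rw [if_neg hgt]
          rcases hex with h0 | ⟨p, hp, hbp⟩
          · exact Or.inl h0
          · right
            refine ⟨p, by simp [hp], ?_⟩
            by_cases hpq : p = q
            · have hcnt : ((C ++ [q]).count q : Int) = (C.count q : Int) + 1 := by
                simp [List.count_append]
              rw [hpq] at hbp ⊢
              omega
            · have hqp : ¬q = p := fun h => hpq h.symm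
              rw [hbp]
              have : (C ++ [q]).count p = C.count p := by
                simp [List.count_append, List.count_singleton, hqp]
              rw [this]
      have := ih (C ++ [q]) (d.insert q (d.getD q 0 + 1))
        (if d.getD q 0 + 1 > b then d.getD q 0 + 1 else b) step1 hb' hex'
      simpa [stepB, List.append_assoc] using this

-- the classifier only takes the values 0 and 1
theorem insert_fold01 (l : List String) (v : Int) (hv : v = 0 ∨ v = 1)
    (d : PySem.Dict String Int) (hd : ∀ t, d.getD t 0 = 0 ∨ d.getD t 0 = 1) :
    ∀ t, (l.foldl (fun d s => d.insert s v) d).getD t 0 = 0 ∨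
      (l.foldl (fun d s => d.insert s v) d).getD t 0 = 1 := by
  induction l generalizing d with
  | nil => exact hd
  | cons s l ih =>
      refine ih _ ?_
      intro t
      by_cases hts : t = s
      · subst hts; rw [PySem.Dict.getD_insert_self]; exact hv
      · rw [PySem.Dict.getD_insert_of_ne _ _ _ hts]; exact hd t

theorem cty01 (kor usa : List String) (t : String) : cty kor usa t = 0 ∨ cty kor usa t = 1 := by
  unfold cty
  exact insert_fold01 usa 1 (Or.inr rfl) _
    (insert_fold01 kor 0 (Or.inl rfl) PySem.Dict.empty
      (fun t => Or.inl (PySem.Dict.getD_empty t 0))) t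

-- filterMap of a guarded some is map of filter
theorem filterMap_guard {α β : Type} (l : List α) (p : α → Prop) [DecidablePred p] (f : α → β) :
    l.filterMap (fun x => if p x then some (f x) else none) = (l.filter (fun x => decide (p x))).map f := by
  induction l with
  | nil => rfl
  | cons x xs ih =>
      by_cases h : p x <;> simp [List.filterMap_cons, List.filter_cons, h, ih]

-- flatMap of cons is a permutation of map ++ flatMap
theorem flatMap_cons_perm {α β : Type} (xs : List α) (a : α → β) (f : α → List β) :
    (xs.flatMap (fun k => a k :: f k)).Perm (xs.map a ++ xs.flatMap f) := by
  induction xs with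
  | nil => simp
  | cons x xs ih =>
      simp only [List.flatMap_cons, List.map_cons, List.cons_append]
      refine List.Perm.cons (a x) ?_
      exact (List.Perm.append_left (f x) ih).trans
        (List.perm_append_comm_assoc (f x) (xs.map a) (xs.flatMap f))

-- per line, A's pair list is a permutation of B's cross product
theorem pairsS_perm_eventsB (c : String → Int) (hc : ∀ t, c t = 0 ∨ c t = 1) (l : List String) :
    (pairsS c l).Perm (eventsB c l) := by
  induction l with
  | nil => simp [pairsS, eventsB]
  | cons t rest ih =>
      rcases hc t with h0 | h1
      · have hpre : rest.filterMap (gpair c t) = (rest.filter (fun s => c s == 1)).map (fun s => (t, s)) := by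
          have : ∀ s, gpair c t s = if c s = 1 then some (t, s) else none := by
            intro s
            unfold gpair
            rcases hc s with hs | hs <;> simp [h0, hs]
          simp only [this]
          rw [filterMap_guard rest (fun s => c s = 1) (fun s => (t, s))]
          rfl
        have hks : (t :: rest).filter (fun s => c s == 0) = t :: rest.filter (fun s => c s == 0) := by
          simp [List.filter_cons, h0]
        have hus : (t :: rest).filter (fun s => c s == 1) = rest.filter (fun s => c s == 1) := by
          simp [List.filter_cons, h0]
        show (rest.filterMap (gpair c t) ++ pairsS c rest).Perm (eventsB c (t :: rest))
        unfold eventsB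
        rw [hks, hus, List.flatMap_cons, hpre]
        exact List.Perm.append (List.Perm.refl _) (by unfold eventsB at ih; exact ih)
      · have hpre : rest.filterMap (gpair c t) = (rest.filter (fun s => c s == 0)).map (fun s => (s, t)) := by
          have : ∀ s, gpair c t s = if c s = 0 then some (s, t) else none := by
            intro s
            unfold gpair
            rcases hc s with hs | hs <;> simp [h1, hs]
          simp only [this]
          rw [filterMap_guard rest (fun s => c s = 0) (fun s => (s, t))]
          rfl
        have hks : (t :: rest).filter (fun s => c s == 0) = rest.filter (fun s => c s == 0) := by
          simp [List.filter_cons, h1]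
        have hus : (t :: rest).filter (fun s => c s == 1) = t :: rest.filter (fun s => c s == 1) := by
          simp [List.filter_cons, h1]
        show (rest.filterMap (gpair c t) ++ pairsS c rest).Perm (eventsB c (t :: rest))
        unfold eventsB
        rw [hks, hus, hpre]
        have hsplit : ((rest.filter (fun s => c s == 0)).flatMap
            (fun k => (t :: rest.filter (fun s => c s == 1)).map (fun u => (k, u)))).Perm
            ((rest.filter (fun s => c s == 0)).map (fun k => (k, t)) ++ eventsB c rest) := by
          unfold eventsB
          simpa using flatMap_cons_perm (rest.filter (fun s => c s == 0))
            (fun k => (k, t)) (fun k => (rest.filter (fun s => c s == 1)).map (fun u => (k, u)))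
        refine List.Perm.trans ?_ hsplit.symm
        exact List.Perm.append (List.Perm.refl _) (by unfold eventsB at ih ⊢; exact ih)

theorem evA_perm_evB (kor usa incs : List String) :
    (evA (cty kor usa) incs).Perm (evB (cty kor usa) incs) := by
  induction incs with
  | nil => simp [evA, evB]
  | cons line incs ih =>
      unfold evA evB
      simp only [List.flatMap_cons]
      exact List.Perm.append (pairsS_perm_eventsB _ (cty01 kor usa) _) ih

-- ===== VERDICT (by name: the statement is the Claim_ definition above) =====
theorem solution_spec : Claim_equal_solution := by
  intro kor usa incs _ _
  unfold Spec_solution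
  rw [solution_eq, solution_alt_eq]
  set c := cty kor usa with hc
  have hperm := evA_perm_evB kor usa incs
  rw [← hc] at hperm
  have hinv := b_invariant (evB c incs) [] PySem.Dict.empty 0
    (by intro p; simp [PySem.Dict.getD_empty]) (by intro p hp; simp at hp) (Or.inl rfl)
  simp only [List.nil_append] at hinv
  obtain ⟨hubB, hexB⟩ := hinv
  by_cases hE : evA c incs = []
  · have hEB : evB c incs = [] := by
      have := hperm; rw [hE] at this; exact this.nil_eq.symm
    rw [hE, hEB]
    simp [PySem.Dict.counter]
  · -- nonempty case: both sides are the maximal multiplicity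
    have hEB : evB c incs ≠ [] := by
      intro h
      rw [h] at hperm
      exact hE hperm.eq_nil
    -- values of the counter
    have hvs : (PySem.Dict.counter (evA c incs)).values
        = (PySem.Set.ofList (evA c incs)).map (fun k => ((evA c incs).count k : Int)) := by
      simp only [PySem.Dict.values, PySem.Dict.items_counter, List.map_map]
      rfl
    have hsetne : PySem.Set.ofList (evA c incs) ≠ [] := by
      intro h
      obtain ⟨p, hp⟩ := List.exists_mem_of_ne_nil _ hE
      have := (PySem.Set.mem_ofList (evA c incs) p).2 hp
      rw [h] at this; simp at this
    have hvsne : (PySem.Dict.counter (evA c incs)).values ≠ [] := by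
      rw [hvs]; simpa using hsetne
    have hsize : ¬(((PySem.Dict.counter (evA c incs)).size == 0) = true) := by
      have : (PySem.Dict.counter (evA c incs)).size = (PySem.Dict.counter (evA c incs)).values.length := by
        simp [PySem.Dict.size, PySem.Dict.values]
      simp only [beq_iff_eq, this]
      intro hlen
      exact hvsne (List.eq_nil_of_length_eq_zero hlen)
    rw [if_neg hsize]
    -- head of the descending sort
    obtain ⟨m, t, hsort⟩ : ∃ m t, PySem.List.sorted (PySem.Dict.counter (evA c incs)).values (fun v => v) true = m :: t := by
      rcases hsrt : PySem.List.sorted (PySem.Dict.counter (evA c incs)).values (fun v => v) true with _ | ⟨m, t⟩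
      · exact absurd ((PySem.List.sorted_eq_nil_iff _ _ _).1 hsrt) hvsne
      · exact ⟨m, t, rfl⟩
    rw [hsort]
    have hhead : PySem.List.pyGetD (m :: t) 0 0 = m := by simp [PySem.List.pyGetD]
    rw [hhead]
    have hmem : m ∈ (PySem.Dict.counter (evA c incs)).values :=
      (PySem.List.sorted_perm _ _ true).mem_iff.1 (hsort ▸ List.mem_cons_self)
    have hge : ∀ y ∈ (PySem.Dict.counter (evA c incs)).values, y ≤ m :=
      PySem.List.key_head_sorted_rev_ge _ _ hsort
    -- m is a multiplicity of evA, and bounds all multiplicities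
    rw [hvs] at hmem hge
    obtain ⟨p0, hp0set, hp0⟩ := List.mem_map.1 hmem
    have hp0E : p0 ∈ evA c incs := (PySem.Set.mem_ofList _ _).1 hp0set
    have hgeE : ∀ p ∈ evA c incs, ((evA c incs).count p : Int) ≤ m := by
      intro p hp
      exact hge _ (List.mem_map.2 ⟨p, (PySem.Set.mem_ofList _ _).2 hp, rfl⟩)
    -- B's result
    set b := ((evB c incs).foldl stepB (PySem.Dict.empty, 0)).2 with hb
    rcases hexB with hb0 | ⟨p1, hp1, hbp1⟩
    · -- impossible: evB nonempty gives a positive count below b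
      obtain ⟨q, hq⟩ := List.exists_mem_of_ne_nil _ hEB
      have h1 := hubB q hq
      have h2 : 1 ≤ (evB c incs).count q := List.one_le_count_iff.2 hq
      omega
    · -- m ≤ b and b ≤ m
      have h1 : m ≤ b := by
        rw [← hp0, hperm.count_eq p0]
        exact hubB p0 (hperm.mem_iff.1 hp0E)
      have h2 : b ≤ m := by
        rw [hbp1, ← hperm.count_eq p1]
        exact hgeE p1 (hperm.mem_iff.2 hp1)
      omega
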